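-- pv_equiv track=rewrite | github.com/Lalexander27/Fastq-Processor | FASTQProcessor.py | translationCount
-- ===== SOURCE A (Python) =====
-- def translationCount(sequence, frameShift):
-- 	#sequence is the DNA sequence, and frameShift is the desired adjustment of the reading frame (0, 1, 2).
-- 	#Need to convert to RNA sequence by replacing T with U
-- 	rnaSeq = sequence.replace("T", "U")
--
-- 	#Set up dictionary of all amino acids to keeps counts of amino acid content in sequence
-- 	aminoAcids = {"Methionine":0, "Alanine":0, "Arginine":0, "Asparagine":0, "Aspartate":0, "Cysteine":0, "Glutamate":0, "Glutamine":0, "Glycine":0, "Histidine":0, "Isoleucine":0, "Leucine":0, "Lysine":0, "Lysine":0, "Phenylalanine":0, "Proline":0, "Serine":0, "Threonine":0, "Tryptophan":0, "Tyrosine":0, "Valine":0}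
--
-- 	#Shift reading frame based on user input, then read to end of sequence
-- 	for n in range(frameShift, len(rnaSeq), 3):
-- 		#Ensure that there are at least 3 nucleotides left in the sequence to determine a codon
-- 		if n + 2 < len(rnaSeq):
-- 			#Each codon is 3 nucleotides long
-- 			codon = rnaSeq[n] + rnaSeq[n+1] + rnaSeq[n+2]
--
-- 			if codon in ("AUG"):
-- 				aminoAcids["Methionine"] += 1
-- 			elif codon in ("AUU", "AUC", "AUA"):
-- 				aminoAcids["Isoleucine"] += 1
-- 			elif codon in ("CGG", "CGA", "CGC", "CGU", "AGG", "AGA"):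
-- 				aminoAcids["Arginine"] += 1
-- 			elif codon in ("CAA", "CAG"):
-- 				aminoAcids["Glutamine"] += 1
-- 			elif codon in ("CAU", "CAC"):
-- 				aminoAcids["Histidine"] += 1
-- 			elif codon in ("CCC", "CCG", "CCA", "CCU"):
-- 				aminoAcids["Proline"] += 1
-- 			elif codon in ("CUU", "CUG", "CUC", "CUA", "UUA", "UUG"):
-- 				aminoAcids["Leucine"] += 1
-- 			elif codon in ("UGG"):
-- 				aminoAcids["Tryptophan"] += 1
-- 			elif codon in ("UGU", "UGC"):
-- 				aminoAcids["Cysteine"] += 1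
-- 			elif codon in ("UAU", "UAC"):
-- 				aminoAcids["Tyrosine"] += 1
-- 			elif codon in ("UCU", "UCC", "UCA", "UCG", "AGU", "AGC"):
-- 				aminoAcids["Serine"] += 1
-- 			elif codon in ("UUU", "UUC"):
-- 				aminoAcids["Phenylalanine"] += 1
-- 			elif codon in ("GGG", "GGC", "GGA", "GGU"):
-- 				aminoAcids["Glycine"] += 1
-- 			elif codon in ("GAA", "GAG"):
-- 				aminoAcids["Glutamate"] += 1
-- 			elif codon in ("GAC", "GAU"):
-- 				aminoAcids["Aspartate"] += 1
-- 			elif codon in ("GCU", "GCC", "GCA", "GCG"):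
-- 				aminoAcids["Alanine"] += 1
-- 			elif codon in ("GUU", "GUC", "GUA", "GUG"):
-- 				aminoAcids["Valine"] += 1
-- 			elif codon in ("AAA", "AAG"):
-- 				aminoAcids["Lysine"] += 1
-- 			elif codon in ("AAU", "AAC"):
-- 				aminoAcids["Asparagine"] += 1
-- 			elif codon in ("ACU", "ACC", "ACA", "ACG"):
-- 				aminoAcids["Threonine"] += 1
--
-- 	return aminoAcids
-- ===== SOURCE B (Python) =====
-- # Forward table: each amino acid (in the original result's key order) with its codon list.
-- _AA_CODONS = [
--     ("Methionine", ["AUG"]),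
--     ("Alanine", ["GCU", "GCC", "GCA", "GCG"]),
--     ("Arginine", ["CGG", "CGA", "CGC", "CGU", "AGG", "AGA"]),
--     ("Asparagine", ["AAU", "AAC"]),
--     ("Aspartate", ["GAC", "GAU"]),
--     ("Cysteine", ["UGU", "UGC"]),
--     ("Glutamate", ["GAA", "GAG"]),
--     ("Glutamine", ["CAA", "CAG"]),
--     ("Glycine", ["GGG", "GGC", "GGA", "GGU"]),
--     ("Histidine", ["CAU", "CAC"]),
--     ("Isoleucine", ["AUU", "AUC", "AUA"]),
--     ("Leucine", ["CUU", "CUG", "CUC", "CUA", "UUA", "UUG"]),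
--     ("Lysine", ["AAA", "AAG"]),
--     ("Phenylalanine", ["UUU", "UUC"]),
--     ("Proline", ["CCC", "CCG", "CCA", "CCU"]),
--     ("Serine", ["UCU", "UCC", "UCA", "UCG", "AGU", "AGC"]),
--     ("Threonine", ["ACU", "ACC", "ACA", "ACG"]),
--     ("Tryptophan", ["UGG"]),
--     ("Tyrosine", ["UAU", "UAC"]),
--     ("Valine", ["GUU", "GUC", "GUA", "GUG"]),
-- ]
--
-- def translationCount(sequence, frameShift):
--     rnaSeq = sequence.replace("T", "U")
--     # Stage 1: histogram of raw codon strings -- no classification happens here.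
--     hist = {}
--     for n in range(frameShift, len(rnaSeq) - 2, 3):
--         codon = rnaSeq[n] + rnaSeq[n + 1] + rnaSeq[n + 2]
--         hist[codon] = hist.get(codon, 0) + 1
--     # Stage 2: per amino acid, sum the histogram over that acid's codons.
--     return {aa: sum(hist.get(c, 0) for c in codons) for aa, codons in _AA_CODONS}
-- ===== Notes on version B (the rewrite author's own statement) =====
-- stated objective: faster
-- what changed: B never classifies a codon in the scan: stage 1 builds a raw codon-string histogram with no amino-acid logic, and stage 2 iterates the 20 amino acids of a forward aa->codon-list table, summing the histogram over each acid's codons; this replaces A's per-codon 20-branch string-comparison classification-and-increment loop.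
import Mathlib
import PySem

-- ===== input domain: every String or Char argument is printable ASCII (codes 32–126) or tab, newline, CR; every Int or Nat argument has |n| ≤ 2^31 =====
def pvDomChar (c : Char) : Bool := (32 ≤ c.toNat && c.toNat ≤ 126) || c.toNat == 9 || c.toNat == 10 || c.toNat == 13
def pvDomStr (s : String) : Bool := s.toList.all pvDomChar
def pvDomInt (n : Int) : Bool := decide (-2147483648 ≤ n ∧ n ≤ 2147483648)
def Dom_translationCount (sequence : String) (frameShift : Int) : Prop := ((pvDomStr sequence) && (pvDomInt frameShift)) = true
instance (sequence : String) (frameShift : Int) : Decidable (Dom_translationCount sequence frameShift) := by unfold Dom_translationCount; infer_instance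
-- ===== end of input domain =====

-- B replaces A's per-codon 20-branch classification loop with two stages: a raw codon-string
-- histogram (no amino-acid logic) followed by a per-amino-acid aggregation over a forward
-- aa→codon-list table (objective: alternative). Return-value equivalence is proved on Pre_
-- (A raises IndexError outside).

-- ===== PORT A =====
-- loop body of A's `for n in range(frameShift, len(rnaSeq), 3)` (named so the proofs can speak about it)
def aBody (rnaSeq : String) (d : PySem.Dict String Int) (n : Int) : PySem.Dict String Int :=
  if n + 2 < PySem.Str.len rnaSeq then
    match PySem.Str.pyGet? rnaSeq n, PySem.Str.pyGet? rnaSeq (n+1), PySem.Str.pyGet? rnaSeq (n+2) with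
    | some c0, some c1, some c2 =>
      let codon := String.ofList [c0, c1, c2]
      if PySem.Str.isIn codon "AUG" then d.modify "Methionine" 0 (· + 1)
      else if codon ∈ ["AUU","AUC","AUA"] then d.modify "Isoleucine" 0 (· + 1)
      else if codon ∈ ["CGG","CGA","CGC","CGU","AGG","AGA"] then d.modify "Arginine" 0 (· + 1)
      else if codon ∈ ["CAA","CAG"] then d.modify "Glutamine" 0 (· + 1)
      else if codon ∈ ["CAU","CAC"] then d.modify "Histidine" 0 (· + 1)
      else if codon ∈ ["CCC","CCG","CCA","CCU"] then d.modify "Proline" 0 (· + 1)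
      else if codon ∈ ["CUU","CUG","CUC","CUA","UUA","UUG"] then d.modify "Leucine" 0 (· + 1)
      else if PySem.Str.isIn codon "UGG" then d.modify "Tryptophan" 0 (· + 1)
      else if codon ∈ ["UGU","UGC"] then d.modify "Cysteine" 0 (· + 1)
      else if codon ∈ ["UAU","UAC"] then d.modify "Tyrosine" 0 (· + 1)
      else if codon ∈ ["UCU","UCC","UCA","UCG","AGU","AGC"] then d.modify "Serine" 0 (· + 1)
      else if codon ∈ ["UUU","UUC"] then d.modify "Phenylalanine" 0 (· + 1)
      else if codon ∈ ["GGG","GGC","GGA","GGU"] then d.modify "Glycine" 0 (· + 1)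
      else if codon ∈ ["GAA","GAG"] then d.modify "Glutamate" 0 (· + 1)
      else if codon ∈ ["GAC","GAU"] then d.modify "Aspartate" 0 (· + 1)
      else if codon ∈ ["GCU","GCC","GCA","GCG"] then d.modify "Alanine" 0 (· + 1)
      else if codon ∈ ["GUU","GUC","GUA","GUG"] then d.modify "Valine" 0 (· + 1)
      else if codon ∈ ["AAA","AAG"] then d.modify "Lysine" 0 (· + 1)
      else if codon ∈ ["AAU","AAC"] then d.modify "Asparagine" 0 (· + 1)
      else if codon ∈ ["ACU","ACC","ACA","ACG"] then d.modify "Threonine" 0 (· + 1)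
      else d
    | _, _, _ => d      -- rnaSeq[n] raises IndexError in Python: excluded by Pre_
  else d

def translationCount (sequence : String) (frameShift : Int) : List (String × Int) :=
  let rnaSeq := PySem.Str.replace sequence "T" "U"
  let aminoAcids : PySem.Dict String Int := PySem.Dict.ofList [("Methionine",0),("Alanine",0),("Arginine",0),("Asparagine",0),("Aspartate",0),("Cysteine",0),("Glutamate",0),("Glutamine",0),("Glycine",0),("Histidine",0),("Isoleucine",0),("Leucine",0),("Lysine",0),("Lysine",0),("Phenylalanine",0),("Proline",0),("Serine",0),("Threonine",0),("Tryptophan",0),("Tyrosine",0),("Valine",0)]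
  ((PySem.List.pyRange frameShift (PySem.Str.len rnaSeq) 3).foldl (aBody rnaSeq) aminoAcids).items

-- ===== PORT B =====
-- forward table: each amino acid (in A's result key order) with its codon list (Source B's _AA_CODONS)
def aaCodons : List (String × List String) :=
  [("Methionine", ["AUG"]),
   ("Alanine", ["GCU", "GCC", "GCA", "GCG"]),
   ("Arginine", ["CGG", "CGA", "CGC", "CGU", "AGG", "AGA"]),
   ("Asparagine", ["AAU", "AAC"]),
   ("Aspartate", ["GAC", "GAU"]),
   ("Cysteine", ["UGU", "UGC"]),
   ("Glutamate", ["GAA", "GAG"]),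
   ("Glutamine", ["CAA", "CAG"]),
   ("Glycine", ["GGG", "GGC", "GGA", "GGU"]),
   ("Histidine", ["CAU", "CAC"]),
   ("Isoleucine", ["AUU", "AUC", "AUA"]),
   ("Leucine", ["CUU", "CUG", "CUC", "CUA", "UUA", "UUG"]),
   ("Lysine", ["AAA", "AAG"]),
   ("Phenylalanine", ["UUU", "UUC"]),
   ("Proline", ["CCC", "CCG", "CCA", "CCU"]),
   ("Serine", ["UCU", "UCC", "UCA", "UCG", "AGU", "AGC"]),
   ("Threonine", ["ACU", "ACC", "ACA", "ACG"]),
   ("Tryptophan", ["UGG"]),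
   ("Tyrosine", ["UAU", "UAC"]),
   ("Valine", ["GUU", "GUC", "GUA", "GUG"])]

-- loop body of B's stage-1 histogram loop (counts the raw codon string)
def bBody (rnaSeq : String) (t : PySem.Dict String Int) (n : Int) : PySem.Dict String Int :=
  match PySem.Str.pyGet? rnaSeq n, PySem.Str.pyGet? rnaSeq (n+1), PySem.Str.pyGet? rnaSeq (n+2) with
  | some c0, some c1, some c2 =>
    let codon := String.ofList [c0, c1, c2]
    t.insert codon (t.getD codon 0 + 1)
  | _, _, _ => t        -- rnaSeq[n] raises IndexError in Python: excluded by Pre_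

def translationCount_alt (sequence : String) (frameShift : Int) : List (String × Int) :=
  let rnaSeq := PySem.Str.replace sequence "T" "U"
  let hist := (PySem.List.pyRange frameShift (PySem.Str.len rnaSeq - 2) 3).foldl (bBody rnaSeq) PySem.Dict.empty
  aaCodons.map (fun p => (p.1, (p.2.map (fun c => hist.getD c 0)).sum))

-- ===== PRECONDITION & SPEC =====
-- Pre_ excludes exactly the inputs where A raises IndexError (a codon read starts before index
-- -len(sequence)); B's loop reads the same positions and raises there too.
def Pre_translationCount (sequence : String) (frameShift : Int) : Prop :=
  ¬ (frameShift < -(PySem.Str.len sequence) ∧ frameShift < PySem.Str.len sequence - 2)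
instance (sequence : String) (frameShift : Int) : Decidable (Pre_translationCount sequence frameShift) := by unfold Pre_translationCount; infer_instance
def pvWitness_translationCount : String × Int := ("ATGAAA", 0)

def Spec_translationCount (sequence : String) (frameShift : Int) (out : List (String × Int)) : Prop := out = translationCount_alt sequence frameShift
instance (sequence : String) (frameShift : Int) (out : List (String × Int)) : Decidable (Spec_translationCount sequence frameShift out) := by unfold Spec_translationCount; infer_instance

-- ===== CLAIM (what is proved, stated in full; the proofs are below) =====
def Claim_equal_translationCount : Prop := ∀ (sequence : String) (frameShift : Int), Dom_translationCount sequence frameShift → Pre_translationCount sequence frameShift → Spec_translationCount sequence frameShift (translationCount sequence frameShift)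

-- ===== LEMMAS AND PROOFS =====

-- reverse codon→amino-acid table (proof-side characterisation of A's if/elif chain)
def codonTable : PySem.Dict String String := PySem.Dict.mk
  [("AUG","Methionine"),
   ("AUU","Isoleucine"), ("AUC","Isoleucine"), ("AUA","Isoleucine"),
   ("CGG","Arginine"), ("CGA","Arginine"), ("CGC","Arginine"), ("CGU","Arginine"),
   ("AGG","Arginine"), ("AGA","Arginine"),
   ("CAA","Glutamine"), ("CAG","Glutamine"),
   ("CAU","Histidine"), ("CAC","Histidine"),
   ("CCC","Proline"), ("CCG","Proline"), ("CCA","Proline"), ("CCU","Proline"),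
   ("CUU","Leucine"), ("CUG","Leucine"), ("CUC","Leucine"), ("CUA","Leucine"),
   ("UUA","Leucine"), ("UUG","Leucine"),
   ("UGG","Tryptophan"),
   ("UGU","Cysteine"), ("UGC","Cysteine"),
   ("UAU","Tyrosine"), ("UAC","Tyrosine"),
   ("UCU","Serine"), ("UCC","Serine"), ("UCA","Serine"), ("UCG","Serine"),
   ("AGU","Serine"), ("AGC","Serine"),
   ("UUU","Phenylalanine"), ("UUC","Phenylalanine"),
   ("GGG","Glycine"), ("GGC","Glycine"), ("GGA","Glycine"), ("GGU","Glycine"),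
   ("GAA","Glutamate"), ("GAG","Glutamate"),
   ("GAC","Aspartate"), ("GAU","Aspartate"),
   ("GCU","Alanine"), ("GCC","Alanine"), ("GCA","Alanine"), ("GCG","Alanine"),
   ("GUU","Valine"), ("GUC","Valine"), ("GUA","Valine"), ("GUG","Valine"),
   ("AAA","Lysine"), ("AAG","Lysine"),
   ("AAU","Asparagine"), ("AAC","Asparagine"),
   ("ACU","Threonine"), ("ACC","Threonine"), ("ACA","Threonine"), ("ACG","Threonine")]

-- A's state, seen as the per-amino-acid aggregation of B's codon histogram
def projB (t : PySem.Dict String Int) : PySem.Dict String Int :=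
  PySem.Dict.mk (aaCodons.map (fun p => (p.1, (p.2.map (fun c => t.getD c 0)).sum)))

-- s.replace("T", "U") is a character map (single-character pattern and replacement)
lemma go_map : ∀ (l acc : List Char) (fuel : Nat), l.length ≤ fuel →
    PySem.Chars.replace.go ['T'] ['U'] fuel l acc
      = acc.reverse ++ l.map (fun c => if c = 'T' then 'U' else c) := by
  intro l
  induction l with
  | nil => intro acc fuel _; cases fuel <;> simp [PySem.Chars.replace.go]
  | cons c t ih =>
    intro acc fuel hf
    cases fuel with
    | zero => simp at hf
    | succ m =>
      by_cases hc : c = 'T'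
      · subst hc
        simp [PySem.Chars.replace.go, List.isPrefixOf, ih ('U' :: acc) m (by simpa using hf)]
      · simp [PySem.Chars.replace.go, List.isPrefixOf, hc, Ne.symm hc,
              ih (c :: acc) m (by simpa using hf)]

lemma replace_toList (s : String) :
    (PySem.Str.replace s "T" "U").toList
      = s.toList.map (fun c => if c = 'T' then 'U' else c) := by
  rw [PySem.Str.toList_replace]
  have h1 : ("T" : String).toList = ['T'] := by decide
  have h2 : ("U" : String).toList = ['U'] := by decide
  rw [h1, h2]
  unfold PySem.Chars.replace
  rw [if_neg (by decide)]
  rw [go_map s.toList [] _ (by simp)]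
  simp

lemma replace_len (s : String) :
    (PySem.Str.replace s "T" "U").toList.length = s.toList.length := by
  rw [replace_toList, List.length_map]

-- an in-range Python index yields a character
lemma pyGet_some (cs : List Char) (i : Int) (h1 : -(cs.length : Int) ≤ i) (h2 : i < (cs.length : Int)) :
    ∃ c, PySem.List.pyGet? cs i = some c := by
  rcases em (0 ≤ i) with h0 | h0
  · have hk : i.toNat < cs.length := by omega
    refine ⟨cs[i.toNat]'hk, ?_⟩
    simp [PySem.List.pyGet?, PySem.List.pyIdx?, h0, h2, List.getElem?_eq_getElem hk]
  · have hk : cs.length - (-i).toNat < cs.length := by omega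
    refine ⟨cs[cs.length - (-i).toNat]'hk, ?_⟩
    simp [PySem.List.pyGet?, PySem.List.pyIdx?, h0, h1, List.getElem?_eq_getElem hk]

-- membership of a 3-character string in a 3-character string is equality
lemma isIn3 (c : String) (hc : c.toList.length = 3) (t : String) (ht : t.toList.length = 3) :
    (PySem.Str.isIn c t = true) ↔ c = t := by
  rw [PySem.Str.isIn_eq, PySem.Chars.isIn_iff_infix]
  constructor
  · intro h
    have := List.IsInfix.eq_of_length h (by omega)
    have h2 : String.ofList c.toList = String.ofList t.toList := by rw [this]
    simpa using h2
  · intro h; subst h; exact List.infix_rfl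

-- A's if/elif chain is lookup in the reverse codon table
theorem chain_eq (c : String) (d : PySem.Dict String Int) :
    (if c = "AUG" then d.modify "Methionine" 0 (· + 1)
     else if c ∈ ["AUU","AUC","AUA"] then d.modify "Isoleucine" 0 (· + 1)
     else if c ∈ ["CGG","CGA","CGC","CGU","AGG","AGA"] then d.modify "Arginine" 0 (· + 1)
     else if c ∈ ["CAA","CAG"] then d.modify "Glutamine" 0 (· + 1)
     else if c ∈ ["CAU","CAC"] then d.modify "Histidine" 0 (· + 1)
     else if c ∈ ["CCC","CCG","CCA","CCU"] then d.modify "Proline" 0 (· + 1)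
     else if c ∈ ["CUU","CUG","CUC","CUA","UUA","UUG"] then d.modify "Leucine" 0 (· + 1)
     else if c = "UGG" then d.modify "Tryptophan" 0 (· + 1)
     else if c ∈ ["UGU","UGC"] then d.modify "Cysteine" 0 (· + 1)
     else if c ∈ ["UAU","UAC"] then d.modify "Tyrosine" 0 (· + 1)
     else if c ∈ ["UCU","UCC","UCA","UCG","AGU","AGC"] then d.modify "Serine" 0 (· + 1)
     else if c ∈ ["UUU","UUC"] then d.modify "Phenylalanine" 0 (· + 1)
     else if c ∈ ["GGG","GGC","GGA","GGU"] then d.modify "Glycine" 0 (· + 1)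
     else if c ∈ ["GAA","GAG"] then d.modify "Glutamate" 0 (· + 1)
     else if c ∈ ["GAC","GAU"] then d.modify "Aspartate" 0 (· + 1)
     else if c ∈ ["GCU","GCC","GCA","GCG"] then d.modify "Alanine" 0 (· + 1)
     else if c ∈ ["GUU","GUC","GUA","GUG"] then d.modify "Valine" 0 (· + 1)
     else if c ∈ ["AAA","AAG"] then d.modify "Lysine" 0 (· + 1)
     else if c ∈ ["AAU","AAC"] then d.modify "Asparagine" 0 (· + 1)
     else if c ∈ ["ACU","ACC","ACA","ACG"] then d.modify "Threonine" 0 (· + 1)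
     else d
    )
    = (match PySem.Dict.get? codonTable c with
      | some k => d.modify k 0 (· + 1)
      | none => d) := by
  by_cases h0 : c = "AUG"
  · subst h0
    have hg : PySem.Dict.get? codonTable "AUG" = some "Methionine" := by decide
    simp [hg, List.mem_cons]
  by_cases h1 : c = "AUU"
  · subst h1
    have hg : PySem.Dict.get? codonTable "AUU" = some "Isoleucine" := by decide
    simp [hg, List.mem_cons]
  by_cases h2 : c = "AUC"
  · subst h2
    have hg : PySem.Dict.get? codonTable "AUC" = some "Isoleucine" := by decide
    simp [hg, List.mem_cons]
  by_cases h3 : c = "AUA"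
  · subst h3
    have hg : PySem.Dict.get? codonTable "AUA" = some "Isoleucine" := by decide
    simp [hg, List.mem_cons]
  by_cases h4 : c = "CGG"
  · subst h4
    have hg : PySem.Dict.get? codonTable "CGG" = some "Arginine" := by decide
    simp [hg, List.mem_cons]
  by_cases h5 : c = "CGA"
  · subst h5
    have hg : PySem.Dict.get? codonTable "CGA" = some "Arginine" := by decide
    simp [hg, List.mem_cons]
  by_cases h6 : c = "CGC"
  · subst h6
    have hg : PySem.Dict.get? codonTable "CGC" = some "Arginine" := by decide
    simp [hg, List.mem_cons]
  by_cases h7 : c = "CGU"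
  · subst h7
    have hg : PySem.Dict.get? codonTable "CGU" = some "Arginine" := by decide
    simp [hg, List.mem_cons]
  by_cases h8 : c = "AGG"
  · subst h8
    have hg : PySem.Dict.get? codonTable "AGG" = some "Arginine" := by decide
    simp [hg, List.mem_cons]
  by_cases h9 : c = "AGA"
  · subst h9
    have hg : PySem.Dict.get? codonTable "AGA" = some "Arginine" := by decide
    simp [hg, List.mem_cons]
  by_cases h10 : c = "CAA"
  · subst h10
    have hg : PySem.Dict.get? codonTable "CAA" = some "Glutamine" := by decide
    simp [hg, List.mem_cons]
  by_cases h11 : c = "CAG"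
  · subst h11
    have hg : PySem.Dict.get? codonTable "CAG" = some "Glutamine" := by decide
    simp [hg, List.mem_cons]
  by_cases h12 : c = "CAU"
  · subst h12
    have hg : PySem.Dict.get? codonTable "CAU" = some "Histidine" := by decide
    simp [hg, List.mem_cons]
  by_cases h13 : c = "CAC"
  · subst h13
    have hg : PySem.Dict.get? codonTable "CAC" = some "Histidine" := by decide
    simp [hg, List.mem_cons]
  by_cases h14 : c = "CCC"
  · subst h14
    have hg : PySem.Dict.get? codonTable "CCC" = some "Proline" := by decide
    simp [hg, List.mem_cons]
  by_cases h15 : c = "CCG"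
  · subst h15
    have hg : PySem.Dict.get? codonTable "CCG" = some "Proline" := by decide
    simp [hg, List.mem_cons]
  by_cases h16 : c = "CCA"
  · subst h16
    have hg : PySem.Dict.get? codonTable "CCA" = some "Proline" := by decide
    simp [hg, List.mem_cons]
  by_cases h17 : c = "CCU"
  · subst h17
    have hg : PySem.Dict.get? codonTable "CCU" = some "Proline" := by decide
    simp [hg, List.mem_cons]
  by_cases h18 : c = "CUU"
  · subst h18
    have hg : PySem.Dict.get? codonTable "CUU" = some "Leucine" := by decide
    simp [hg, List.mem_cons]
  by_cases h19 : c = "CUG"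
  · subst h19
    have hg : PySem.Dict.get? codonTable "CUG" = some "Leucine" := by decide
    simp [hg, List.mem_cons]
  by_cases h20 : c = "CUC"
  · subst h20
    have hg : PySem.Dict.get? codonTable "CUC" = some "Leucine" := by decide
    simp [hg, List.mem_cons]
  by_cases h21 : c = "CUA"
  · subst h21
    have hg : PySem.Dict.get? codonTable "CUA" = some "Leucine" := by decide
    simp [hg, List.mem_cons]
  by_cases h22 : c = "UUA"
  · subst h22
    have hg : PySem.Dict.get? codonTable "UUA" = some "Leucine" := by decide
    simp [hg, List.mem_cons]
  by_cases h23 : c = "UUG"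
  · subst h23
    have hg : PySem.Dict.get? codonTable "UUG" = some "Leucine" := by decide
    simp [hg, List.mem_cons]
  by_cases h24 : c = "UGG"
  · subst h24
    have hg : PySem.Dict.get? codonTable "UGG" = some "Tryptophan" := by decide
    simp [hg, List.mem_cons]
  by_cases h25 : c = "UGU"
  · subst h25
    have hg : PySem.Dict.get? codonTable "UGU" = some "Cysteine" := by decide
    simp [hg, List.mem_cons]
  by_cases h26 : c = "UGC"
  · subst h26
    have hg : PySem.Dict.get? codonTable "UGC" = some "Cysteine" := by decide
    simp [hg, List.mem_cons]
  by_cases h27 : c = "UAU"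
  · subst h27
    have hg : PySem.Dict.get? codonTable "UAU" = some "Tyrosine" := by decide
    simp [hg, List.mem_cons]
  by_cases h28 : c = "UAC"
  · subst h28
    have hg : PySem.Dict.get? codonTable "UAC" = some "Tyrosine" := by decide
    simp [hg, List.mem_cons]
  by_cases h29 : c = "UCU"
  · subst h29
    have hg : PySem.Dict.get? codonTable "UCU" = some "Serine" := by decide
    simp [hg, List.mem_cons]
  by_cases h30 : c = "UCC"
  · subst h30
    have hg : PySem.Dict.get? codonTable "UCC" = some "Serine" := by decide
    simp [hg, List.mem_cons]
  by_cases h31 : c = "UCA"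
  · subst h31
    have hg : PySem.Dict.get? codonTable "UCA" = some "Serine" := by decide
    simp [hg, List.mem_cons]
  by_cases h32 : c = "UCG"
  · subst h32
    have hg : PySem.Dict.get? codonTable "UCG" = some "Serine" := by decide
    simp [hg, List.mem_cons]
  by_cases h33 : c = "AGU"
  · subst h33
    have hg : PySem.Dict.get? codonTable "AGU" = some "Serine" := by decide
    simp [hg, List.mem_cons]
  by_cases h34 : c = "AGC"
  · subst h34
    have hg : PySem.Dict.get? codonTable "AGC" = some "Serine" := by decide
    simp [hg, List.mem_cons]
  by_cases h35 : c = "UUU"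
  · subst h35
    have hg : PySem.Dict.get? codonTable "UUU" = some "Phenylalanine" := by decide
    simp [hg, List.mem_cons]
  by_cases h36 : c = "UUC"
  · subst h36
    have hg : PySem.Dict.get? codonTable "UUC" = some "Phenylalanine" := by decide
    simp [hg, List.mem_cons]
  by_cases h37 : c = "GGG"
  · subst h37
    have hg : PySem.Dict.get? codonTable "GGG" = some "Glycine" := by decide
    simp [hg, List.mem_cons]
  by_cases h38 : c = "GGC"
  · subst h38
    have hg : PySem.Dict.get? codonTable "GGC" = some "Glycine" := by decide
    simp [hg, List.mem_cons]
  by_cases h39 : c = "GGA"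
  · subst h39
    have hg : PySem.Dict.get? codonTable "GGA" = some "Glycine" := by decide
    simp [hg, List.mem_cons]
  by_cases h40 : c = "GGU"
  · subst h40
    have hg : PySem.Dict.get? codonTable "GGU" = some "Glycine" := by decide
    simp [hg, List.mem_cons]
  by_cases h41 : c = "GAA"
  · subst h41
    have hg : PySem.Dict.get? codonTable "GAA" = some "Glutamate" := by decide
    simp [hg, List.mem_cons]
  by_cases h42 : c = "GAG"
  · subst h42
    have hg : PySem.Dict.get? codonTable "GAG" = some "Glutamate" := by decide
    simp [hg, List.mem_cons]
  by_cases h43 : c = "GAC"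
  · subst h43
    have hg : PySem.Dict.get? codonTable "GAC" = some "Aspartate" := by decide
    simp [hg, List.mem_cons]
  by_cases h44 : c = "GAU"
  · subst h44
    have hg : PySem.Dict.get? codonTable "GAU" = some "Aspartate" := by decide
    simp [hg, List.mem_cons]
  by_cases h45 : c = "GCU"
  · subst h45
    have hg : PySem.Dict.get? codonTable "GCU" = some "Alanine" := by decide
    simp [hg, List.mem_cons]
  by_cases h46 : c = "GCC"
  · subst h46
    have hg : PySem.Dict.get? codonTable "GCC" = some "Alanine" := by decide
    simp [hg, List.mem_cons]
  by_cases h47 : c = "GCA"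
  · subst h47
    have hg : PySem.Dict.get? codonTable "GCA" = some "Alanine" := by decide
    simp [hg, List.mem_cons]
  by_cases h48 : c = "GCG"
  · subst h48
    have hg : PySem.Dict.get? codonTable "GCG" = some "Alanine" := by decide
    simp [hg, List.mem_cons]
  by_cases h49 : c = "GUU"
  · subst h49
    have hg : PySem.Dict.get? codonTable "GUU" = some "Valine" := by decide
    simp [hg, List.mem_cons]
  by_cases h50 : c = "GUC"
  · subst h50
    have hg : PySem.Dict.get? codonTable "GUC" = some "Valine" := by decide
    simp [hg, List.mem_cons]
  by_cases h51 : c = "GUA"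
  · subst h51
    have hg : PySem.Dict.get? codonTable "GUA" = some "Valine" := by decide
    simp [hg, List.mem_cons]
  by_cases h52 : c = "GUG"
  · subst h52
    have hg : PySem.Dict.get? codonTable "GUG" = some "Valine" := by decide
    simp [hg, List.mem_cons]
  by_cases h53 : c = "AAA"
  · subst h53
    have hg : PySem.Dict.get? codonTable "AAA" = some "Lysine" := by decide
    simp [hg, List.mem_cons]
  by_cases h54 : c = "AAG"
  · subst h54
    have hg : PySem.Dict.get? codonTable "AAG" = some "Lysine" := by decide
    simp [hg, List.mem_cons]
  by_cases h55 : c = "AAU"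
  · subst h55
    have hg : PySem.Dict.get? codonTable "AAU" = some "Asparagine" := by decide
    simp [hg, List.mem_cons]
  by_cases h56 : c = "AAC"
  · subst h56
    have hg : PySem.Dict.get? codonTable "AAC" = some "Asparagine" := by decide
    simp [hg, List.mem_cons]
  by_cases h57 : c = "ACU"
  · subst h57
    have hg : PySem.Dict.get? codonTable "ACU" = some "Threonine" := by decide
    simp [hg, List.mem_cons]
  by_cases h58 : c = "ACC"
  · subst h58
    have hg : PySem.Dict.get? codonTable "ACC" = some "Threonine" := by decide
    simp [hg, List.mem_cons]
  by_cases h59 : c = "ACA"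
  · subst h59
    have hg : PySem.Dict.get? codonTable "ACA" = some "Threonine" := by decide
    simp [hg, List.mem_cons]
  by_cases h60 : c = "ACG"
  · subst h60
    have hg : PySem.Dict.get? codonTable "ACG" = some "Threonine" := by decide
    simp [hg, List.mem_cons]
  have hg : PySem.Dict.get? codonTable c = none := by
    simp only [codonTable, PySem.Dict.get?_mk_cons, beq_iff_eq]
    simp [PySem.Dict.get?, Ne.symm h0, Ne.symm h1, Ne.symm h2, Ne.symm h3, Ne.symm h4, Ne.symm h5, Ne.symm h6, Ne.symm h7, Ne.symm h8, Ne.symm h9, Ne.symm h10, Ne.symm h11, Ne.symm h12, Ne.symm h13, Ne.symm h14, Ne.symm h15, Ne.symm h16, Ne.symm h17, Ne.symm h18, Ne.symm h19, Ne.symm h20, Ne.symm h21, Ne.symm h22, Ne.symm h23, Ne.symm h24, Ne.symm h25, Ne.symm h26, Ne.symm h27, Ne.symm h28, Ne.symm h29, Ne.symm h30, Ne.symm h31, Ne.symm h32, Ne.symm h33, Ne.symm h34, Ne.symm h35, Ne.symm h36, Ne.symm h37, Ne.symm h38, Ne.symm h39, Ne.symm h40, Ne.symm h41, Ne.symm h42,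 Ne.symm h43, Ne.symm h44, Ne.symm h45, Ne.symm h46, Ne.symm h47, Ne.symm h48, Ne.symm h49, Ne.symm h50, Ne.symm h51, Ne.symm h52, Ne.symm h53, Ne.symm h54, Ne.symm h55, Ne.symm h56, Ne.symm h57, Ne.symm h58, Ne.symm h59, Ne.symm h60]
  simp [hg, List.mem_cons, h0, h1, h2, h3, h4, h5, h6, h7, h8, h9, h10, h11, h12, h13, h14, h15, h16, h17, h18, h19, h20, h21, h22, h23, h24, h25, h26, h27, h28, h29, h30, h31, h32, h33, h34, h35, h36, h37, h38, h39, h40, h41, h42, h43, h44, h45, h46, h47, h48, h49, h50, h51, h52, h53, h54, h55, h56, h57, h58, h59, h60]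

-- inserting a key absent from every codon list does not change the aggregation
lemma proj_insert_none (c : String) (hq : PySem.Dict.get? codonTable c = none)
    (t : PySem.Dict String Int) (v : Int) :
    projB (t.insert c v) = projB t := by
  have hnot : ∀ p ∈ aaCodons, ∀ c' ∈ p.2, PySem.Dict.get? codonTable c' ≠ none := by decide
  unfold projB
  congr 1
  apply List.map_congr_left
  intro p hp
  congr 1
  congr 1
  apply List.map_congr_left
  intro c' hc'
  rw [PySem.Dict.getD_insert]
  rw [if_neg]
  intro heq
  exact hnot p hp c' hc' (heq ▸ hq)

-- counting a classified codon commutes with the aggregation: increment of one amino-acid slot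
set_option maxHeartbeats 4000000 in
lemma proj_incr (c aa : String) (hq : PySem.Dict.get? codonTable c = some aa)
    (t : PySem.Dict String Int) :
    (projB t).modify aa 0 (· + 1) = projB (t.insert c (t.getD c 0 + 1)) := by
  have hm : (c, aa) ∈ codonTable.items := PySem.Dict.mem_items_of_get?_eq_some codonTable hq
  fin_cases hm <;>
    (apply PySem.Dict.ext
     simp [projB, aaCodons, PySem.Dict.modify, PySem.Dict.items_insert_of_contains,
           PySem.Dict.getD_eq_get?_getD, PySem.Dict.get?_mk_cons, PySem.Dict.get?_insert]) <;>
    ring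

-- one step of A on the aggregated state is one step of B, aggregated
lemma step_eq (rna : String) (t : PySem.Dict String Int) (n : Int)
    (h1 : -(rna.toList.length : Int) ≤ n) (h2 : n + 2 < (rna.toList.length : Int)) :
    aBody rna (projB t) n = projB (bBody rna t n) := by
  have hlen : PySem.Str.len rna = (rna.toList.length : Int) := PySem.Str.len_eq rna
  obtain ⟨c0, hc0⟩ := pyGet_some rna.toList n (by omega) (by omega)
  obtain ⟨c1, hc1⟩ := pyGet_some rna.toList (n+1) (by omega) (by omega)
  obtain ⟨c2, hc2⟩ := pyGet_some rna.toList (n+2) (by omega) (by omega)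
  have g0 : PySem.Str.pyGet? rna n = some c0 := by simpa using hc0
  have g1 : PySem.Str.pyGet? rna (n+1) = some c1 := by simpa using hc1
  have g2 : PySem.Str.pyGet? rna (n+2) = some c2 := by simpa using hc2
  have hpos : n + 2 < PySem.Str.len rna := by rw [hlen]; exact h2
  unfold aBody bBody
  rw [if_pos hpos, g0, g1, g2]
  have hL3 : (String.ofList [c0, c1, c2]).toList.length = 3 := by simp
  simp only [isIn3 _ hL3 "AUG" (by decide), isIn3 _ hL3 "UGG" (by decide)]
  rw [chain_eq]
  cases hq : PySem.Dict.get? codonTable (String.ofList [c0, c1, c2]) with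
  | none => exact (proj_insert_none _ hq t _).symm
  | some aa => exact proj_incr _ aa hq t

-- A and B walk the same codon positions: fold equality over any list of admissible positions
lemma fold_eq (rna : String) : ∀ (l : List Int) (t : PySem.Dict String Int),
    (∀ n ∈ l, -(rna.toList.length : Int) ≤ n ∧ n + 2 < (rna.toList.length : Int)) →
    l.foldl (aBody rna) (projB t) = projB (l.foldl (bBody rna) t) := by
  intro l
  induction l with
  | nil => intro t _; rfl
  | cons n l ih =>
    intro t h
    obtain ⟨hn, hl⟩ := List.forall_mem_cons.mp h
    simp only [List.foldl_cons]
    rw [step_eq rna t n hn.1 hn.2]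
    exact ih _ hl

lemma aBody_guard_false (rna : String) (d : PySem.Dict String Int) (n : Int)
    (h : ¬ (n + 2 < PySem.Str.len rna)) : aBody rna d n = d := by
  simp only [aBody]
  rw [if_neg h]

-- the main fold correspondence
lemma main_fold (rna : String) (f : Int)
    (hpre : -(rna.toList.length : Int) ≤ f ∨ (rna.toList.length : Int) - 2 ≤ f) :
    (PySem.List.pyRange f (PySem.Str.len rna) 3).foldl (aBody rna) (projB PySem.Dict.empty)
      = projB ((PySem.List.pyRange f (PySem.Str.len rna - 2) 3).foldl (bBody rna) PySem.Dict.empty) := by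
  have hlen : PySem.Str.len rna = (rna.toList.length : Int) := PySem.Str.len_eq rna
  rw [hlen]
  set L : Int := (rna.toList.length : Int) with hLdef
  rw [PySem.List.pyRange_of_pos f L (by norm_num), PySem.List.pyRange_of_pos f (L-2) (by norm_num)]
  set N1 := (if f < L then ((L - f + 3 - 1) / 3).toNat else 0) with hN1
  set N2 := (if f < L - 2 then ((L - 2 - f + 3 - 1) / 3).toNat else 0) with hN2
  have hbound : N2 ≤ N1 ∧ N1 ≤ N2 + 1 := by rw [hN1, hN2]; split_ifs <;> omega
  have hguardT : ∀ k : Nat, k < N2 → f + 3 * (k : Int) + 2 < L := by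
    rw [hN2]; split_ifs with h <;> intro k hk <;> omega
  have hguardF : ∀ k : Nat, N2 ≤ k → ¬ (f + 3 * (k : Int) + 2 < L) := by
    rw [hN2]; split_ifs with h <;> intro k hk <;> omega
  have hlow : N2 = 0 ∨ -L ≤ f := by
    rcases hpre with h | h
    · exact Or.inr h
    · left; rw [hN2, if_neg (by omega)]
  have hfold : (List.map (fun k : Nat => f + 3 * (k : Int)) (List.range N2)).foldl (aBody rna) (projB PySem.Dict.empty)
      = projB ((List.map (fun k : Nat => f + 3 * (k : Int)) (List.range N2)).foldl (bBody rna) PySem.Dict.empty) := by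
    apply fold_eq
    intro n hn
    obtain ⟨k, hk, rfl⟩ := List.mem_map.mp hn
    have hk' := List.mem_range.mp hk
    have hg := hguardT k hk'
    constructor
    · rcases hlow with h0 | h0 <;> omega
    · omega
  rcases (by omega : N1 = N2 ∨ N1 = N2 + 1) with h | h
  · rw [h]; exact hfold
  · rw [h, List.range_succ, List.map_append, List.foldl_append]
    simp only [List.map_cons, List.map_nil, List.foldl_cons, List.foldl_nil]
    rw [aBody_guard_false rna _ _ (by rw [hlen]; exact hguardF N2 le_rfl)]
    exact hfold

-- A's initial dictionary (with its duplicated "Lysine" key) is the aggregation of the empty histogram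
lemma init_eq : PySem.Dict.ofList ([("Methionine",0),("Alanine",0),("Arginine",0),("Asparagine",0),("Aspartate",0),("Cysteine",0),("Glutamate",0),("Glutamine",0),("Glycine",0),("Histidine",0),("Isoleucine",0),("Leucine",0),("Lysine",0),("Lysine",0),("Phenylalanine",0),("Proline",0),("Serine",0),("Threonine",0),("Tryptophan",0),("Tyrosine",0),("Valine",0)] : List (String × Int)) = projB PySem.Dict.empty := by
  decide

-- ===== VERDICT (by name: the statement is the Claim_ definition above) =====
theorem translationCount_spec : Claim_equal_translationCount := by
  unfold Claim_equal_translationCount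
  intro s f _ hpre
  unfold Spec_translationCount translationCount translationCount_alt
  simp only [init_eq]
  have hrl : (PySem.Str.replace s "T" "U").toList.length = s.toList.length := replace_len s
  have hps : PySem.Str.len s = (s.toList.length : Int) := PySem.Str.len_eq s
  unfold Pre_translationCount at hpre
  rw [hps] at hpre
  rw [main_fold (PySem.Str.replace s "T" "U") f (by omega)]
  rfl
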